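-- pv_equiv track=rewrite | github.com/hacetheworld/competitive-programming-practices | contests/codeforce/div-3/Codeforces Round #693/C.py | Solution
-- ===== SOURCE A (Python) =====
-- def Solution(arr, n):
--     mx = 0
--     dp = [0 for _ in range(len(arr))]
--     for i in range(len(arr)-1, -1, -1):
--         total = 0
--         total += arr[i]
--         if (i+arr[i]) < n:
--             total += dp[i+arr[i]]
--         dp[i] = total
--         mx = max(mx, dp[i])
--     return mx
-- ===== SOURCE B (Python) =====
-- def Solution(arr, n):
--     mx = 0
--     for i in range(len(arr)):
--         total = 0
--         j = i
--         while True: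
--             a = arr[j]
--             total += a
--             if j + a < n:
--                 j = j + a
--             else:
--                 break
--         mx = max(mx, total)
--     return mx
-- ===== Notes on version B (the rewrite author's own statement) =====
-- stated objective: simpler
-- what changed: Replaced the backward-filled dp memo table with a direct per-start chain walk: for each start index the jump chain is followed with an inner while loop accumulating the sum, no table is maintained.
-- outside the precondition, e.g. on Solution([0], 1): A returns 0, B does not finish within the time limit; on Solution([-1, 1], 2): A returns 1, B does not finish within the time limit
import Mathlib
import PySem

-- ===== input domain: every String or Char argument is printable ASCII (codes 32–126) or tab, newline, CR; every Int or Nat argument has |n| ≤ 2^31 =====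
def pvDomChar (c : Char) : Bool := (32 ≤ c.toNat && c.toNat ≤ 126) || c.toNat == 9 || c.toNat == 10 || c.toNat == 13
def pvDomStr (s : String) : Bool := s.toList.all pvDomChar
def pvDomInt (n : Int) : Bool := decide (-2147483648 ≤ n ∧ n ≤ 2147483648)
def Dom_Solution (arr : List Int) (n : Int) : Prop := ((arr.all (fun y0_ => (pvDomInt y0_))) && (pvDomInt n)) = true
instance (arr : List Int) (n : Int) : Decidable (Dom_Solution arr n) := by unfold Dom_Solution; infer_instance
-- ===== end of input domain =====

-- B replaces the backward dp memo table with a direct per-start chain walk (simpler, no table; return value only).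

-- ===== PORT A =====
-- one loop iteration of A: state (mx, dp), index i
def SolutionStep (arr : List Int) (n : Int) (st : Int × List Int) (i : Int) : Int × List Int :=
  let dp := st.2
  let a := PySem.List.pyGetD arr i 0                 -- arr[i]
  let total0 : Int := 0 + a                          -- total = 0; total += arr[i]
  let total := if i + a < n then total0 + PySem.List.pyGetD dp (i + a) 0 else total0
  let dp' := PySem.List.pySetD dp i total            -- dp[i] = total
  (max st.1 total, dp')                              -- mx = max(mx, dp[i])

def Solution (arr : List Int) (n : Int) : Int :=
  ((PySem.List.pyRange ((arr.length : Int) - 1) (-1) (-1)).foldl (SolutionStep arr n)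
      (0, List.replicate arr.length 0)).1

-- ===== PORT B =====
-- the inner 'while True' walk of Source B; fuel only makes the recursion total
-- (under Pre_ the visited indices strictly increase below arr.length, so fuel = arr.length is never exhausted)
def chainWalk (arr : List Int) (n : Int) : Nat → Int → Int → Int
  | 0, _, total => total
  | fuel + 1, j, total =>
      let a := PySem.List.pyGetD arr j 0             -- a = arr[j]
      let total' := total + a                        -- total += a
      if j + a < n then chainWalk arr n fuel (j + a) total' else total'

def Solution_alt (arr : List Int) (n : Int) : Int :=
  (List.range arr.length).foldl
    (fun (mx : Int) (i : Nat) => max mx (chainWalk arr n arr.length (i : Int) 0)) 0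

-- ===== PRECONDITION & SPEC =====
-- Pre_ excludes inputs on which some taken jump (i+arr[i] < n) has a non-positive step or lands outside
-- [0, len(arr)): there A raises an IndexError or returns a value produced by Python's negative-index
-- wraparound / leftover zeros of the dp table, and B's chain walk may raise or not terminate.
def Pre_Solution (arr : List Int) (n : Int) : Prop :=
  ∀ i : Nat, i < arr.length →
    (i : Int) + arr.getD i 0 < n →
      1 ≤ arr.getD i 0 ∧ (i : Int) + arr.getD i 0 < (arr.length : Int)
instance (arr : List Int) (n : Int) : Decidable (Pre_Solution arr n) := by
  unfold Pre_Solution; infer_instance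

def pvWitness_Solution : List Int × Int := ([2, 1, 3, 1], 4)

def Spec_Solution (arr : List Int) (n : Int) (out : Int) : Prop := out = Solution_alt arr n
instance (arr : List Int) (n : Int) (out : Int) : Decidable (Spec_Solution arr n out) := by
  unfold Spec_Solution; infer_instance

-- ===== CLAIM (what is proved, stated in full; the proofs are below) =====
def Claim_equal_Solution : Prop :=
  ∀ (arr : List Int) (n : Int), Dom_Solution arr n → Pre_Solution arr n →
    Spec_Solution arr n (Solution arr n)

-- ===== LEMMAS AND PROOFS =====

-- reference value of one chain: refVal i = arr[i] + (refVal (i+arr[i]) if jump taken else 0)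
def refVal (arr : List Int) (n : Int) (i : Nat) : Int :=
  if _h : i < arr.length then
    if _h2 : (i : Int) + arr.getD i 0 < n ∧ 1 ≤ arr.getD i 0 then
      arr.getD i 0 + refVal arr n (i + (arr.getD i 0).toNat)
    else arr.getD i 0
  else 0
termination_by arr.length - i
decreasing_by
  have : 1 ≤ (arr.getD i 0).toNat := by omega
  omega

lemma refVal_of_taken (arr : List Int) (n : Int) (i : Nat) (h : i < arr.length)
    (h2 : (i : Int) + arr.getD i 0 < n) (h3 : 1 ≤ arr.getD i 0) :
    refVal arr n i = arr.getD i 0 + refVal arr n (i + (arr.getD i 0).toNat) := by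
  rw [refVal, dif_pos h, dif_pos ⟨h2, h3⟩]

lemma refVal_of_not_taken (arr : List Int) (n : Int) (i : Nat) (h : i < arr.length)
    (h2 : ¬ ((i : Int) + arr.getD i 0 < n)) :
    refVal arr n i = arr.getD i 0 := by
  rw [refVal, dif_pos h, dif_neg (by tauto)]

lemma chainWalk_eq (arr : List Int) (n : Int) (hpre : Pre_Solution arr n) :
    ∀ (fuel : Nat) (j : Nat), j < arr.length → arr.length - j ≤ fuel → ∀ t : Int,
      chainWalk arr n fuel (j : Int) t = t + refVal arr n j := by
  intro fuel
  induction fuel with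
  | zero => intro j hj hf t; omega
  | succ f ih =>
    intro j hj hf t
    have ha : PySem.List.pyGetD arr (j : Int) 0 = arr.getD j 0 := by
      simp [PySem.List.pyGetD_natCast]
    by_cases hc : (j : Int) + arr.getD j 0 < n
    · obtain ⟨h1, h2⟩ := hpre j hj hc
      have hcastnj : (j : Int) + arr.getD j 0 = ((j + (arr.getD j 0).toNat : Nat) : Int) := by
        omega
      have hnjlt : j + (arr.getD j 0).toNat < arr.length := by omega
      have hfuel : arr.length - (j + (arr.getD j 0).toNat) ≤ f := by omega
      simp only [chainWalk, ha, hc, if_pos]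
      rw [hcastnj, ih _ hnjlt hfuel]
      rw [refVal_of_taken arr n j hj hc h1]
      ring
    · simp only [chainWalk, ha, hc, if_neg, not_false_iff]
      rw [refVal_of_not_taken arr n j hj hc]

-- pull a 'max' out of a running-max fold
lemma foldl_max_pull (f : Nat → Int) (l : List Nat) (a b : Int) :
    l.foldl (fun z j => max z (f j)) (max a b) = max (l.foldl (fun z j => max z (f j)) a) b := by
  induction l generalizing a with
  | nil => rfl
  | cons h t ih =>
    simp only [List.foldl_cons]
    rw [max_right_comm a b (f h), ih]

-- one iteration of A's loop at index m, with dp already correct above m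
lemma step_eq (arr : List Int) (n : Int) (hpre : Pre_Solution arr n) (m : Nat)
    (hm : m < arr.length) (mx : Int) (dp : List Int) (hlen : dp.length = arr.length)
    (hdp : ∀ j : Nat, m + 1 ≤ j → j < arr.length → dp.getD j 0 = refVal arr n j) :
    SolutionStep arr n (mx, dp) (m : Int)
      = (max mx (refVal arr n m), dp.set m (refVal arr n m)) := by
  have ha : PySem.List.pyGetD arr (m : Int) 0 = arr.getD m 0 := by
    simp [PySem.List.pyGetD_natCast]
  by_cases hc : (m : Int) + arr.getD m 0 < n
  · obtain ⟨h1, h2⟩ := hpre m hm hc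
    have hcastnj : (m : Int) + arr.getD m 0 = ((m + (arr.getD m 0).toNat : Nat) : Int) := by
      omega
    have hnjlt : m + (arr.getD m 0).toNat < arr.length := by omega
    have hdpval : PySem.List.pyGetD dp ((m : Int) + arr.getD m 0) 0
        = refVal arr n (m + (arr.getD m 0).toNat) := by
      rw [hcastnj]
      simp only [PySem.List.pyGetD_natCast]
      exact hdp _ (by omega) hnjlt
    simp only [SolutionStep, ha, hc, if_pos, hdpval, PySem.List.pySetD_natCast]
    rw [refVal_of_taken arr n m hm hc h1]
    simp
  · simp only [SolutionStep, ha, hc, if_neg, not_false_iff, PySem.List.pySetD_natCast]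
    rw [refVal_of_not_taken arr n m hm hc]
    simp

-- A's whole backward loop computes the running max of refVal over the processed indices
lemma foldA (arr : List Int) (n : Int) (hpre : Pre_Solution arr n) :
    ∀ (m : Nat), m ≤ arr.length → ∀ (mx : Int) (dp : List Int),
      dp.length = arr.length →
      (∀ j : Nat, m ≤ j → j < arr.length → dp.getD j 0 = refVal arr n j) →
      (((List.range m).map (fun (k : Nat) => ((m : Int) - 1) - (k : Int))).foldl
          (SolutionStep arr n) (mx, dp)).1
        = (List.range m).foldl (fun z j => max z (refVal arr n j)) mx := by
  intro m
  induction m with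
  | zero => intro _ mx dp _ _; simp
  | succ m ih =>
    intro hm mx dp hlen hdp
    have hlist : (List.range (m + 1)).map (fun (k : Nat) => ((m + 1 : Nat) : Int) - 1 - (k : Int))
        = (m : Int) :: (List.range m).map (fun (k : Nat) => ((m : Int) - 1) - (k : Int)) := by
      rw [List.range_succ_eq_map, List.map_cons, List.map_map]
      congr 1
      · push_cast; ring
      · apply List.map_congr_left
        intro k _
        simp only [Function.comp_apply, Nat.succ_eq_add_one]
        push_cast; ring
    rw [hlist, List.foldl_cons,
        step_eq arr n hpre m (by omega) mx dp hlen (fun j hj hj' => hdp j (by omega) hj')]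
    have hres := ih (by omega) (max mx (refVal arr n m)) (dp.set m (refVal arr n m))
      (by simp [hlen])
      (by
        intro j hj hj'
        by_cases hjm : j = m
        · subst hjm
          rw [List.getD_eq_getElem?_getD, List.getElem?_set_self (by omega)]
          simp
        · rw [List.getD_eq_getElem?_getD, List.getElem?_set_ne (by omega)]
          rw [← List.getD_eq_getElem?_getD]
          exact hdp j (by omega) hj')
    rw [hres, List.range_succ, List.foldl_append, List.foldl_cons, List.foldl_nil,
        foldl_max_pull]

lemma Solution_eq_maxfold (arr : List Int) (n : Int) (hpre : Pre_Solution arr n) :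
    Solution arr n = (List.range arr.length).foldl (fun z j => max z (refVal arr n j)) 0 := by
  unfold Solution
  have hr : PySem.List.pyRange ((arr.length : Int) - 1) (-1) (-1)
      = (List.range arr.length).map (fun (k : Nat) => ((arr.length : Int) - 1) - (k : Int)) := by
    rw [PySem.List.pyRange_neg_one]
    have : (((arr.length : Int) - 1) - (-1)).toNat = arr.length := by omega
    rw [this]
  rw [hr, foldA arr n hpre arr.length le_rfl 0 (List.replicate arr.length 0)
        (by simp) (by intro j hj hj'; omega)]

lemma Solution_alt_eq_maxfold (arr : List Int) (n : Int) (hpre : Pre_Solution arr n) :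
    Solution_alt arr n = (List.range arr.length).foldl (fun z j => max z (refVal arr n j)) 0 := by
  unfold Solution_alt
  apply PySem.List.foldl_congr_mem
  intro acc i hi
  rw [chainWalk_eq arr n hpre arr.length i (List.mem_range.mp hi) (by omega) 0, zero_add]

-- ===== VERDICT (by name: the statement is the Claim_ definition above) =====
theorem Solution_spec : Claim_equal_Solution := by
  intro arr n _ hpre
  unfold Spec_Solution
  rw [Solution_eq_maxfold arr n hpre, Solution_alt_eq_maxfold arr n hpre]
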